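-- pv_equiv track=rewrite | github.com/Aliibz/projectpythonGFAliLindsay | cleaned/Functions.py | diviser_texte
-- ===== SOURCE A (Python) =====
-- def diviser_texte(texte, separateur=' '):
--     """Divise une chaîne de caractères"""
--     mots = []
--     mot_actuel = ''
--
--     for car in texte:
--         if car == separateur:
--             if mot_actuel:
--                 mots.append(mot_actuel)
--                 mot_actuel = ''
--         else:
--             mot_actuel += car
--
--     if mot_actuel:
--         mots.append(mot_actuel)
--
--     return mots
-- ===== SOURCE B (Python) =====
-- from itertools import groupby
--
--
-- def diviser_texte(texte, separateur=' '):
--     """Divise une chaîne de caractères"""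
--     return [''.join(groupe) for cle, groupe in
--             groupby(texte, key=lambda car: car == separateur) if not cle]
-- ===== Notes on version B (the rewrite author's own statement) =====
-- stated objective: idiomatic
-- what changed: Replaces the character-by-character flush-on-separator accumulator loop with itertools.groupby partitioning the input into maximal separator/non-separator runs and joining the non-separator runs.
import Mathlib
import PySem

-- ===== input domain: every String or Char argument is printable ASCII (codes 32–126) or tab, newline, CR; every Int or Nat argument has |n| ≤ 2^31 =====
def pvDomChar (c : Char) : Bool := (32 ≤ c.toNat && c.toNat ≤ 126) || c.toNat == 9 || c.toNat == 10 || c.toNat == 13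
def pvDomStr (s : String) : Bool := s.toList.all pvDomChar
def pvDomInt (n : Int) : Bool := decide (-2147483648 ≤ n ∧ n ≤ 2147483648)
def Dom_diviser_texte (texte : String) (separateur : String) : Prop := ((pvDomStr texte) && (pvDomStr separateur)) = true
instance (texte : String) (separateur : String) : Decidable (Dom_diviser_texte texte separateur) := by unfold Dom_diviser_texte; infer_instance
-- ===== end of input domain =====

-- ===== PORT A =====
-- B replaces A's flush-on-separator accumulator loop by grouping the input into
-- maximal separator/non-separator runs (itertools.groupby) and joining the
-- non-separator runs; objective: idiomatic.
-- Python string values are handled on the List Char side (PySem convention);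
-- `car == separateur` (1-char string vs string) is ported exactly as [car] == separateur.toList.
def diviser_texte (texte : String) (separateur : String) : List String :=
  let r := texte.toList.foldl
    (fun (st : List String × List Char) car =>
      if [car] == separateur.toList then
        (if st.2.isEmpty then st else (st.1 ++ [String.ofList st.2], []))
      else (st.1, st.2 ++ [car]))
    ([], [])
  if r.2.isEmpty then r.1 else r.1 ++ [String.ofList r.2]

-- ===== PORT B =====
-- itertools.groupby: maximal runs of equal key, built back-to-front (structural recursion).
def pvGroupby (p : Char → Bool) : List Char → List (Bool × List Char)
  | [] => []
  | c :: cs =>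
    match pvGroupby p cs with
    | [] => [(p c, [c])]
    | (k, run) :: rest =>
      if p c == k then (k, c :: run) :: rest else (p c, [c]) :: (k, run) :: rest

def diviser_texte_alt (texte : String) (separateur : String) : List String :=
  ((pvGroupby (fun c => [c] == separateur.toList) texte.toList).filter
      (fun g => !g.1)).map (fun g => String.ofList g.2)

-- ===== PRECONDITION & SPEC =====
def Spec_diviser_texte (texte : String) (separateur : String) (out : List String) : Prop := out = diviser_texte_alt texte separateur
instance (texte : String) (separateur : String) (out : List String) : Decidable (Spec_diviser_texte texte separateur out) := by unfold Spec_diviser_texte; infer_instance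

-- ===== CLAIM (what is proved, stated in full; the proofs are below) =====
def Claim_equal_diviser_texte : Prop := ∀ (texte : String) (separateur : String), Dom_diviser_texte texte separateur → Spec_diviser_texte texte separateur (diviser_texte texte separateur)

-- ===== LEMMAS AND PROOFS =====

-- recursive restatement of A's loop (over chars, with the pending word as the second arg)
def pvLoopA (p : Char → Bool) : List Char → List Char → List String
  | [], cur => if cur.isEmpty then [] else [String.ofList cur]
  | c :: cs, cur =>
    if p c then (if cur.isEmpty then pvLoopA p cs [] else String.ofList cur :: pvLoopA p cs [])
    else pvLoopA p cs (cur ++ [c])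

-- B's result as a function of the char list
def pvB (p : Char → Bool) (cs : List Char) : List String :=
  ((pvGroupby p cs).filter (fun g => !g.1)).map (fun g => String.ofList g.2)

theorem pvBridgeA (sep : String) (cs : List Char) (mots : List String) (cur : List Char) :
    (let r := cs.foldl
      (fun (st : List String × List Char) car =>
        if [car] == sep.toList then
          (if st.2.isEmpty then st else (st.1 ++ [String.ofList st.2], []))
        else (st.1, st.2 ++ [car]))
      (mots, cur)
     ; if r.2.isEmpty then r.1 else r.1 ++ [String.ofList r.2])
    = mots ++ pvLoopA (fun c => [c] == sep.toList) cs cur := by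
  induction cs generalizing mots cur with
  | nil =>
    simp only [List.foldl_nil, pvLoopA]
    cases cur <;> simp
  | cons c cs ih =>
    simp only [List.foldl_cons, pvLoopA]
    by_cases hp : ([c] == sep.toList) = true
    · cases hcur : cur.isEmpty <;> simp only [hp, if_true, if_false, Bool.false_eq_true]
      · rw [ih]
        simp
      · have := List.isEmpty_iff.mp hcur; subst this
        rw [ih]
    · simp only [hp, Bool.false_eq_true, ite_false]
      rw [ih]

theorem pvGroupby_cons (p : Char → Bool) (c : Char) (cs : List Char) :
    pvGroupby p (c :: cs)
      = (p c, c :: cs.takeWhile (fun d => p d == p c))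
          :: pvGroupby p (cs.dropWhile (fun d => p d == p c)) := by
  induction cs generalizing c with
  | nil => simp [pvGroupby]
  | cons d cs ih =>
    have hu : pvGroupby p (c :: d :: cs) =
        (match pvGroupby p (d :: cs) with
         | [] => [(p c, [c])]
         | (k, run) :: rest =>
            if p c == k then (k, c :: run) :: rest else (p c, [c]) :: (k, run) :: rest) := rfl
    rw [hu, ih d]
    by_cases h : p c = p d
    · simp [h]
    · have h2 : (p d == p c) = false := beq_eq_false_iff_ne.mpr (Ne.symm h)
      have h3 : (p c == p d) = false := beq_eq_false_iff_ne.mpr h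
      simp only [List.takeWhile_cons, List.dropWhile_cons, h2, h3, Bool.false_eq_true, ite_false]
      rw [← ih d]

theorem pvLoopA_skip (p : Char → Bool) (t : List Char) (h : ∀ c ∈ t, p c = true) (u : List Char) :
    pvLoopA p (t ++ u) [] = pvLoopA p u [] := by
  induction t with
  | nil => rfl
  | cons c t ih =>
    have hc := h c (by simp)
    simp only [List.cons_append, pvLoopA, hc, if_true, List.isEmpty_nil]
    exact ih (fun d hd => h d (by simp [hd]))

theorem pvLoopA_accum (p : Char → Bool) (t : List Char) (h : ∀ c ∈ t, p c = false)
    (u : List Char) (cur : List Char) :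
    pvLoopA p (t ++ u) cur = pvLoopA p u (cur ++ t) := by
  induction t generalizing cur with
  | nil => simp
  | cons c t ih =>
    have hc := h c (by simp)
    simp only [List.cons_append, pvLoopA, hc, Bool.false_eq_true, ite_false]
    rw [ih (fun d hd => h d (by simp [hd]))]
    simp

theorem pvDropWhile_head_false {q : Char → Bool} {l : List Char} {d : Char} {u : List Char}
    (h : l.dropWhile q = d :: u) : q d = false := by
  have := List.head?_dropWhile_not q l
  rw [h] at this; simpa using this

theorem pvMain (p : Char → Bool) : ∀ (n : Nat) (cs : List Char), cs.length ≤ n →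
    pvLoopA p cs [] = pvB p cs := by
  intro n
  induction n with
  | zero =>
    intro cs hcs
    have : cs = [] := List.eq_nil_of_length_eq_zero (Nat.le_zero.mp hcs)
    subst this; rfl
  | succ n ih =>
    intro cs hcs
    cases cs with
    | nil => rfl
    | cons c cs' =>
      have hlen : cs'.length ≤ n := by simpa using hcs
      by_cases hp : p c = true
      · -- head run is separators: dropped by both sides
        have hq : ∀ d ∈ cs'.takeWhile (fun d => p d == p c), p d = true := by
          intro d hd
          have := List.mem_takeWhile_imp hd
          rw [hp] at this; simpa using this
        have hsplit := List.takeWhile_append_dropWhile (p := fun d => p d == p c) (l := cs')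
        have h1 : pvLoopA p (c :: cs') [] = pvLoopA p (cs'.dropWhile (fun d => p d == p c)) [] := by
          have step : pvLoopA p (c :: cs') [] = pvLoopA p cs' [] := by
            simp [pvLoopA, hp]
          rw [step]
          conv_lhs => rw [← hsplit]
          exact pvLoopA_skip p _ hq _
        have h2 : pvB p (c :: cs') = pvB p (cs'.dropWhile (fun d => p d == p c)) := by
          simp [pvB, pvGroupby_cons, hp]
        rw [h1, h2]
        exact ih _ (le_trans (List.length_dropWhile_le _ _) hlen)
      · -- head run is a word
        have hp' : p c = false := by simpa using hp
        have hq : ∀ d ∈ cs'.takeWhile (fun d => p d == p c), p d = false := by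
          intro d hd
          have := List.mem_takeWhile_imp hd
          rw [hp'] at this; simpa using this
        have hsplit := List.takeWhile_append_dropWhile (p := fun d => p d == p c) (l := cs')
        have h1 : pvLoopA p (c :: cs') []
            = pvLoopA p (cs'.dropWhile (fun d => p d == p c))
                (c :: cs'.takeWhile (fun d => p d == p c)) := by
          have step : pvLoopA p (c :: cs') [] = pvLoopA p cs' [c] := by
            simp [pvLoopA, hp']
          rw [step]
          conv_lhs => rw [← hsplit]
          rw [pvLoopA_accum p _ hq]
          rfl
        rw [h1]
        have h2 : pvB p (c :: cs')
            = String.ofList (c :: cs'.takeWhile (fun d => p d == p c))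
                :: pvB p (cs'.dropWhile (fun d => p d == p c)) := by
          simp [pvB, pvGroupby_cons, hp']
        rw [h2]
        cases hdw : cs'.dropWhile (fun d => p d == p c) with
        | nil => simp [pvLoopA, pvB, pvGroupby]
        | cons d u' =>
          have hd : p d = true := by
            have := pvDropWhile_head_false hdw
            rw [hp'] at this; simpa using this
          simp only [pvLoopA, hd, if_true, List.isEmpty_cons]
          rw [if_neg (by simp : ¬ (false = true))]
          congr 1
          -- fA u' [] = pvB (d :: u')
          have hq' : ∀ e ∈ u'.takeWhile (fun e => p e == p d), p e = true := by
            intro e he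
            have := List.mem_takeWhile_imp he
            rw [hd] at this; simpa using this
          have hsplit' := List.takeWhile_append_dropWhile (p := fun e => p e == p d) (l := u')
          have h3 : pvLoopA p u' [] = pvLoopA p (u'.dropWhile (fun e => p e == p d)) [] := by
            conv_lhs => rw [← hsplit']
            exact pvLoopA_skip p _ hq' _
          have h4 : pvB p (d :: u') = pvB p (u'.dropWhile (fun e => p e == p d)) := by
            simp [pvB, pvGroupby_cons, hd]
          rw [h3, h4]
          have hlen' : (u'.dropWhile (fun e => p e == p d)).length ≤ n := by
            have : (d :: u').length ≤ cs'.length := by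
              rw [← hdw]; exact List.length_dropWhile_le _ _
            have hu : u'.length < cs'.length := by simpa using this
            exact le_trans (List.length_dropWhile_le _ _) (by omega)
          exact ih _ hlen'

-- ===== VERDICT (by name: the statement is the Claim_ definition above) =====
theorem diviser_texte_spec : Claim_equal_diviser_texte := by
  intro texte sep _
  unfold Spec_diviser_texte diviser_texte diviser_texte_alt
  have hb := pvBridgeA sep texte.toList [] []
  simp only [List.nil_append] at hb
  rw [hb]
  exact pvMain _ texte.toList.length texte.toList le_rfl
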